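-- pv_equiv track=rewrite | github.com/MaximLevchenko/python | python_tasks/backtracking_sudoku.py | is_distinct
-- ===== SOURCE A (Python) =====
-- def is_distinct(list_of_nums):
--     used_nums=[]
--     for i in list_of_nums:
--         if i==0:
--             continue#continue is used to start the iteration again with another num in the loop
--         if i in used_nums:
--             return False
--         else:
--             used_nums.append(i)
--     return True
-- ===== SOURCE B (Python) =====
-- def is_distinct(list_of_nums):
--     nums = [x for x in list_of_nums if x != 0]
--     return len(nums) == len(set(nums))
-- ===== Notes on version B (the rewrite author's own statement) =====
-- stated objective: simpler
-- what changed: Replaces the incremental membership-test loop with early return by a filter of the nonzero elements followed by a single cardinality comparison against their set.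
import Mathlib
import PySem

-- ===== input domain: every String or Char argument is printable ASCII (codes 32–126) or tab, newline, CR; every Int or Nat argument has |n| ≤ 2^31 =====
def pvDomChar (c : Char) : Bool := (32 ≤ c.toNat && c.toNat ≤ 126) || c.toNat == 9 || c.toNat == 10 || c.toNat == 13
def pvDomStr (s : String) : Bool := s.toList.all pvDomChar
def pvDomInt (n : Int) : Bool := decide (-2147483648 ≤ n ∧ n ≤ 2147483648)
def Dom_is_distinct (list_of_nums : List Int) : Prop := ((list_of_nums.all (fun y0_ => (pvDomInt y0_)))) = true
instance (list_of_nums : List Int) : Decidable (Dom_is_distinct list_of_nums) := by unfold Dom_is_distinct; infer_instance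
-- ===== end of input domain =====

-- B replaces A's incremental membership-test loop (early return) by filtering the
-- nonzero elements once and comparing their count with their set's cardinality (simpler).


-- ===== PORT A =====
-- the 'for i in list_of_nums' loop carrying used_nums, with early 'return False'
def isDistinctLoop : List Int → List Int → Bool
  | [], _ => true
  | i :: rest, used =>
    if i == 0 then isDistinctLoop rest used
    else if used.contains i then false
    else isDistinctLoop rest (used ++ [i])

def is_distinct (list_of_nums : List Int) : Bool := isDistinctLoop list_of_nums []

-- ===== PORT B =====
def is_distinct_alt (list_of_nums : List Int) : Bool :=
  let nums := list_of_nums.filter (fun x => !(x == 0))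
  nums.length == (PySem.Set.ofList nums).length

-- ===== PRECONDITION & SPEC =====
def Spec_is_distinct (list_of_nums : List Int) (out : Bool) : Prop := out = is_distinct_alt list_of_nums
instance (list_of_nums : List Int) (out : Bool) : Decidable (Spec_is_distinct list_of_nums out) := by unfold Spec_is_distinct; infer_instance

-- ===== CLAIM (what is proved, stated in full; the proofs are below) =====
def Claim_equal_is_distinct : Prop := ∀ (list_of_nums : List Int), Dom_is_distinct list_of_nums → Spec_is_distinct list_of_nums (is_distinct list_of_nums)

-- ===== LEMMAS AND PROOFS =====

-- A's loop succeeds iff the nonzero elements are distinct and disjoint from used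
theorem isDistinctLoop_iff (l used : List Int) :
    isDistinctLoop l used = true ↔
      (l.filter (fun x => !(x == 0))).Nodup ∧ ∀ x ∈ l.filter (fun x => !(x == 0)), x ∉ used := by
  induction l generalizing used with
  | nil => simp [isDistinctLoop]
  | cons i rest ih =>
    by_cases h0 : i = 0
    · subst h0
      simp [isDistinctLoop, ih]
    · have hf : (List.filter (fun x => !(x == 0)) (i :: rest)) =
        i :: List.filter (fun x => !(x == 0)) rest := by
        simp [h0]
      by_cases hm : i ∈ used
      · simp only [isDistinctLoop, beq_iff_eq, h0, if_false,
          List.contains_eq_mem, decide_eq_true_eq, hm, if_true, hf]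
        constructor
        · intro h; exact absurd h (by simp)
        · rintro ⟨-, hdisj⟩
          exact absurd hm (hdisj i (by simp))
      · simp only [isDistinctLoop, beq_iff_eq, h0, if_false,
          List.contains_eq_mem, decide_eq_true_eq, hm, if_false, ih, hf,
          List.nodup_cons, List.mem_cons]
        constructor
        · rintro ⟨hnd, hdisj⟩
          refine ⟨⟨fun hi => (hdisj i hi (by simp)), hnd⟩, ?_⟩
          intro x hx
          rcases hx with rfl | hx
          · exact hm
          · intro hxu
            exact hdisj x hx (by simp [hxu])
        · rintro ⟨⟨hni, hnd⟩, hdisj⟩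
          refine ⟨hnd, ?_⟩
          intro x hx hxu
          rcases List.mem_append.mp hxu with hxu | hxu
          · exact hdisj x (Or.inr hx) hxu
          · simp at hxu
            subst hxu
            exact hni hx

-- |set(xs)| = |xs| iff xs has no duplicates
theorem length_ofList_eq_iff (xs : List Int) :
    (PySem.Set.ofList xs).length = xs.length ↔ xs.Nodup := by
  induction xs using List.reverseRecOn with
  | nil => simp
  | append_singleton xs x ih =>
    rw [PySem.Set.ofList_append_singleton, PySem.Set.add]
    have hnd : (xs ++ [x]).Nodup ↔ xs.Nodup ∧ x ∉ xs := by
      constructor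
      · intro h
        rcases List.nodup_append.mp h with ⟨h1, -, h3⟩
        exact ⟨h1, fun hm => (h3 x hm x (by simp)) rfl⟩
      · rintro ⟨h1, h2⟩
        exact List.nodup_append.mpr ⟨h1, List.nodup_singleton x,
          fun a ha b hb => by simp at hb; subst hb; exact fun he => h2 (he ▸ ha)⟩
    by_cases hm : x ∈ xs
    · have hc : ((PySem.Set.ofList xs).contains x) = true :=
        (PySem.Set.contains_iff _ _).mpr ((PySem.Set.mem_ofList _ _).mpr hm)
      have hle := PySem.Set.length_ofList_le (xs := xs)
      simp only [hc, if_true, List.length_append, List.length_singleton, hnd]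
      constructor
      · intro h; omega
      · rintro ⟨-, hxm⟩; exact absurd hm hxm
    · have hc : ((PySem.Set.ofList xs).contains x) = false := by
        rcases Bool.eq_false_or_eq_true ((PySem.Set.ofList xs).contains x) with h | h
        · exact absurd ((PySem.Set.mem_ofList _ _).mp ((PySem.Set.contains_iff _ _).mp h)) hm
        · exact h
      simp only [hc, Bool.false_eq_true, if_false, List.length_append, List.length_singleton, hnd]
      constructor
      · intro h
        exact ⟨ih.mp (by omega), hm⟩
      · rintro ⟨h1, -⟩
        rw [ih.mpr h1]

theorem is_distinct_eq (l : List Int) : is_distinct l = is_distinct_alt l := by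
  have hA := isDistinctLoop_iff l []
  simp only [List.not_mem_nil, not_false_iff, implies_true, and_true] at hA
  have hB : is_distinct_alt l = true ↔ (l.filter (fun x => !(x == 0))).Nodup := by
    unfold is_distinct_alt
    simp only [beq_iff_eq]
    constructor
    · intro h; exact (length_ofList_eq_iff _).mp h.symm
    · intro h; exact ((length_ofList_eq_iff _).mpr h).symm
  unfold is_distinct
  cases hx : is_distinct_alt l with
  | false =>
    cases hy : isDistinctLoop l [] with
    | false => rfl
    | true => exact absurd (hB.mpr (hA.mp hy)) (by simp [hx])
  | true => exact hA.mpr (hB.mp hx)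

-- ===== VERDICT (by name: the statement is the Claim_ definition above) =====
theorem is_distinct_spec : Claim_equal_is_distinct := by
  intro l _
  exact is_distinct_eq l
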